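-- pv_equiv track=rewrite | github.com/WwwwwHM/OCTA_Web | octa_backend/models/attention_unet_transformer/model.py | _infer_model_kwargs_from_state_dict
-- ===== SOURCE A (Python) =====
-- from typing import Any, Dict, Optional, Sequence, Tuple
--
-- def _infer_model_kwargs_from_state_dict(state_dict: Dict[str, Any]) -> Dict[str, Any]:
--     """从权重键名推断训练时模型开关，和离线predict.py保持一致。"""
--     inferred = {
--         "use_residual": True,
--         "use_gated_attention": True,
--         "use_spatial_attention": False,
--         "use_pde_attention": False,
--         "use_aspp": False,
--         "use_edge_branch": False,
--         "return_edge": False,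
--     }
--
--     if any(key.startswith("downs.0.conv1") for key in state_dict.keys()):
--         inferred["use_residual"] = True
--     elif any(key.startswith("downs.0.block.0") or key.startswith("downs.0.0") for key in state_dict.keys()):
--         inferred["use_residual"] = False
--
--     inferred["use_gated_attention"] = any(
--         key.startswith("gated_attentions.") or key.startswith("attentions.")
--         for key in state_dict.keys()
--     )
--     inferred["use_spatial_attention"] = any(key.startswith("spatial_attentions.") for key in state_dict.keys())
--     inferred["use_pde_attention"] = any(key.startswith("pde_attentions.") for key in state_dict.keys())
--     inferred["use_aspp"] = any(key.startswith("aspp.") for key in state_dict.keys())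
--     inferred["use_edge_branch"] = any(key.startswith("edge_branch.") for key in state_dict.keys())
--
--     return inferred
-- ===== SOURCE B (Python) =====
-- from typing import Any, Dict
--
-- def _infer_model_kwargs_from_state_dict(state_dict: Dict[str, Any]) -> Dict[str, Any]:
--     """Single pass over the keys: OR-accumulate each prefix test, then build the dict once."""
--     conv1 = block = gated = spatial = pde = aspp = edge = False
--     for key in state_dict:
--         conv1 = conv1 or key.startswith("downs.0.conv1")
--         block = block or key.startswith("downs.0.block.0") or key.startswith("downs.0.0")
--         gated = gated or key.startswith("gated_attentions.") or key.startswith("attentions.")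
--         spatial = spatial or key.startswith("spatial_attentions.")
--         pde = pde or key.startswith("pde_attentions.")
--         aspp = aspp or key.startswith("aspp.")
--         edge = edge or key.startswith("edge_branch.")
--     return {
--         "use_residual": conv1 or not block,
--         "use_gated_attention": gated,
--         "use_spatial_attention": spatial,
--         "use_pde_attention": pde,
--         "use_aspp": aspp,
--         "use_edge_branch": edge,
--         "return_edge": False,
--     }
-- ===== Notes on version B (the rewrite author's own statement) =====
-- stated objective: simpler
-- what changed: Replaces A's seven separate any(...) scans of the keys (plus an if/elif on the residual flag) with one pass that OR-accumulates all prefix tests and then builds the result dict in a single literal, with use_residual computed as conv1 or not block.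
import Mathlib
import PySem

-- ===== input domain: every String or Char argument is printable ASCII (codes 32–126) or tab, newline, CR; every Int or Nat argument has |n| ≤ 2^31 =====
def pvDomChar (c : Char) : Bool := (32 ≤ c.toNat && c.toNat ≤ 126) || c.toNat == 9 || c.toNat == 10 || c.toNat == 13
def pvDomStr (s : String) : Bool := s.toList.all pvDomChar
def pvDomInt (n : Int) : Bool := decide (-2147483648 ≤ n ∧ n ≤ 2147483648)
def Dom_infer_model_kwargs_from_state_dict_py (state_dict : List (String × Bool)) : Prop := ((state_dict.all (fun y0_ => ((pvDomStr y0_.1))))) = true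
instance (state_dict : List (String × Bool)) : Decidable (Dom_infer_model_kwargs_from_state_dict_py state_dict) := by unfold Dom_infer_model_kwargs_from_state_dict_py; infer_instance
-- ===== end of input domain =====

-- B replaces A's seven separate any(...) scans of the keys with one OR-accumulating pass (objective: simpler).

-- ===== PORT A =====
def infer_model_kwargs_from_state_dict_py (state_dict : List (String × Bool)) : List (String × Bool) :=
  let keys := state_dict.map (·.1)
  let inferred : PySem.Dict String Bool := PySem.Dict.ofList
    [("use_residual", true), ("use_gated_attention", true), ("use_spatial_attention", false),
     ("use_pde_attention", false), ("use_aspp", false), ("use_edge_branch", false), ("return_edge", false)]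
  let inferred :=
    if keys.any (fun key => PySem.Str.startswith key "downs.0.conv1") then
      inferred.insert "use_residual" true
    else if keys.any (fun key => PySem.Str.startswith key "downs.0.block.0" || PySem.Str.startswith key "downs.0.0") then
      inferred.insert "use_residual" false
    else inferred
  let inferred := inferred.insert "use_gated_attention"
    (keys.any (fun key => PySem.Str.startswith key "gated_attentions." || PySem.Str.startswith key "attentions."))
  let inferred := inferred.insert "use_spatial_attention" (keys.any (fun key => PySem.Str.startswith key "spatial_attentions."))
  let inferred := inferred.insert "use_pde_attention" (keys.any (fun key => PySem.Str.startswith key "pde_attentions."))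
  let inferred := inferred.insert "use_aspp" (keys.any (fun key => PySem.Str.startswith key "aspp."))
  let inferred := inferred.insert "use_edge_branch" (keys.any (fun key => PySem.Str.startswith key "edge_branch."))
  inferred.items

-- ===== PORT B =====
def infer_model_kwargs_from_state_dict_py_alt (state_dict : List (String × Bool)) : List (String × Bool) :=
  let acc := state_dict.foldl
    (fun (a : Bool × Bool × Bool × Bool × Bool × Bool × Bool) kv =>
      let key := kv.1
      (a.1 || PySem.Str.startswith key "downs.0.conv1",
       a.2.1 || PySem.Str.startswith key "downs.0.block.0" || PySem.Str.startswith key "downs.0.0",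
       a.2.2.1 || PySem.Str.startswith key "gated_attentions." || PySem.Str.startswith key "attentions.",
       a.2.2.2.1 || PySem.Str.startswith key "spatial_attentions.",
       a.2.2.2.2.1 || PySem.Str.startswith key "pde_attentions.",
       a.2.2.2.2.2.1 || PySem.Str.startswith key "aspp.",
       a.2.2.2.2.2.2 || PySem.Str.startswith key "edge_branch."))
    (false, false, false, false, false, false, false)
  [("use_residual", acc.1 || !acc.2.1),
   ("use_gated_attention", acc.2.2.1),
   ("use_spatial_attention", acc.2.2.2.1),
   ("use_pde_attention", acc.2.2.2.2.1),
   ("use_aspp", acc.2.2.2.2.2.1),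
   ("use_edge_branch", acc.2.2.2.2.2.2),
   ("return_edge", false)]

-- ===== PRECONDITION & SPEC =====
def Spec_infer_model_kwargs_from_state_dict_py (state_dict : List (String × Bool)) (out : List (String × Bool)) : Prop := out = infer_model_kwargs_from_state_dict_py_alt state_dict
instance (state_dict : List (String × Bool)) (out : List (String × Bool)) : Decidable (Spec_infer_model_kwargs_from_state_dict_py state_dict out) := by unfold Spec_infer_model_kwargs_from_state_dict_py; infer_instance

-- ===== CLAIM (what is proved, stated in full; the proofs are below) =====
def Claim_equal_infer_model_kwargs_from_state_dict_py : Prop := ∀ (state_dict : List (String × Bool)), Dom_infer_model_kwargs_from_state_dict_py state_dict → Spec_infer_model_kwargs_from_state_dict_py state_dict (infer_model_kwargs_from_state_dict_py state_dict)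

-- ===== LEMMAS AND PROOFS =====

-- B's single fold computes the seven `any` scans at once.
theorem fold7_eq_any (l : List (String × Bool)) (b1 b2 b3 b4 b5 b6 b7 : Bool) :
    l.foldl
      (fun (a : Bool × Bool × Bool × Bool × Bool × Bool × Bool) kv =>
        let key := kv.1
        (a.1 || PySem.Str.startswith key "downs.0.conv1",
         a.2.1 || PySem.Str.startswith key "downs.0.block.0" || PySem.Str.startswith key "downs.0.0",
         a.2.2.1 || PySem.Str.startswith key "gated_attentions." || PySem.Str.startswith key "attentions.",
         a.2.2.2.1 || PySem.Str.startswith key "spatial_attentions.",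
         a.2.2.2.2.1 || PySem.Str.startswith key "pde_attentions.",
         a.2.2.2.2.2.1 || PySem.Str.startswith key "aspp.",
         a.2.2.2.2.2.2 || PySem.Str.startswith key "edge_branch."))
      (b1, b2, b3, b4, b5, b6, b7) =
    (b1 || (l.map (·.1)).any (fun key => PySem.Str.startswith key "downs.0.conv1"),
     b2 || (l.map (·.1)).any (fun key => PySem.Str.startswith key "downs.0.block.0" || PySem.Str.startswith key "downs.0.0"),
     b3 || (l.map (·.1)).any (fun key => PySem.Str.startswith key "gated_attentions." || PySem.Str.startswith key "attentions."),
     b4 || (l.map (·.1)).any (fun key => PySem.Str.startswith key "spatial_attentions."),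
     b5 || (l.map (·.1)).any (fun key => PySem.Str.startswith key "pde_attentions."),
     b6 || (l.map (·.1)).any (fun key => PySem.Str.startswith key "aspp."),
     b7 || (l.map (·.1)).any (fun key => PySem.Str.startswith key "edge_branch.")) := by
  induction l generalizing b1 b2 b3 b4 b5 b6 b7 with
  | nil => simp
  | cons hd tl ih =>
      simp only [List.foldl_cons, List.map_cons, List.any_cons, ih]
      simp [Bool.or_assoc]

-- ===== VERDICT (by name: the statement is the Claim_ definition above) =====
theorem infer_model_kwargs_from_state_dict_py_spec : Claim_equal_infer_model_kwargs_from_state_dict_py := by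
  intro state_dict _
  unfold Spec_infer_model_kwargs_from_state_dict_py
  unfold infer_model_kwargs_from_state_dict_py infer_model_kwargs_from_state_dict_py_alt
  rw [fold7_eq_any]
  simp only [Bool.false_or]
  generalize (state_dict.map (·.1)).any (fun key => PySem.Str.startswith key "downs.0.conv1") = r1
  generalize (state_dict.map (·.1)).any (fun key => PySem.Str.startswith key "downs.0.block.0" || PySem.Str.startswith key "downs.0.0") = r2
  generalize (state_dict.map (·.1)).any (fun key => PySem.Str.startswith key "gated_attentions." || PySem.Str.startswith key "attentions.") = g
  generalize (state_dict.map (·.1)).any (fun key => PySem.Str.startswith key "spatial_attentions.") = sp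
  generalize (state_dict.map (·.1)).any (fun key => PySem.Str.startswith key "pde_attentions.") = pd
  generalize (state_dict.map (·.1)).any (fun key => PySem.Str.startswith key "aspp.") = ap
  generalize (state_dict.map (·.1)).any (fun key => PySem.Str.startswith key "edge_branch.") = eb
  cases r1 <;> cases r2 <;> cases g <;> cases sp <;> cases pd <;> cases ap <;> cases eb <;> decide
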